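-- pv_equiv track=rewrite | github.com/NathanFallet/MPSI | ds/ds2Arthur/premier_narcissique.py | nombres_premiers_narcissiques
-- ===== SOURCE A (Python) =====
-- from math import isqrt
--
-- def nombres_premiers_narcissiques(n):
--     # On reprend la fonction premier de l'exercice précedent
--     def premier(n):
--         def diviseurs(n):
--             diviseurs = []
--             for i in range(1, isqrt(n) + 1):
--                 if n % i == 0:
--                     diviseurs.append(i)
--                     if n // i != i:
--                         diviseurs.append(n//i)
--             return diviseurs
--         if len(diviseurs(n)) == 2:
--             return True
--         return False
--
--     # On reprend la fonction narcisse de l'exercice précédent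
--     def narcisse(n):
--         def chiffres(n):
--             if n == 0:
--                 return [0]
--             L = []
--             while n != 0:
--                 L.append(n % 10)
--                 n = n // 10
--             return [*reversed(L)]
--         chiffre = chiffres(n)
--         somme = 0
--         for i in chiffre:
--             somme += i**len(chiffre)
--         if somme == n:
--             return True
--         return False
--
--     # On initialise une liste vide
--     liste = []
--     # Pour chaque nombre jusqu'à n
--     for i in range(n):
--         # Si le nombre est narcissique et premier
--         if narcisse(i) and premier(i):
--             # On l'ajoute à la liste
--             liste.append(i)
--
--     # On retourne la liste
--     return liste
-- ===== SOURCE B (Python) =====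
-- def nombres_premiers_narcissiques(n):
--     def est_premier(k):
--         if k < 2:
--             return False
--         d = 2
--         while d * d <= k:
--             if k % d == 0:
--                 return False
--             d += 1
--         return True
--
--     def est_narcissique(k, p):
--         # p is the digit count shared by the whole block
--         s, m = 0, k
--         while m != 0:
--             s += (m % 10) ** p
--             m //= 10
--         return s == k
--
--     res = []
--     lo, p = 0, 1
--     while lo < n:
--         hi = min(n, 10 * lo if lo else 10)
--         for k in range(lo, hi):
--             if est_narcissique(k, p) and est_premier(k):
--                 res.append(k)
--         lo, p = hi, p + 1
--     return res
-- ===== Notes on version B (the rewrite author's own statement) =====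
-- stated objective: faster
-- what changed: B scans the candidate range in digit-length blocks so the narcissistic exponent is fixed per block and the digit sum is a bare arithmetic loop (no digit list is built or reversed, no per-number length computation), and primality is an early-exit trial division instead of enumerating the full divisor list and counting it.
import Mathlib
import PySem

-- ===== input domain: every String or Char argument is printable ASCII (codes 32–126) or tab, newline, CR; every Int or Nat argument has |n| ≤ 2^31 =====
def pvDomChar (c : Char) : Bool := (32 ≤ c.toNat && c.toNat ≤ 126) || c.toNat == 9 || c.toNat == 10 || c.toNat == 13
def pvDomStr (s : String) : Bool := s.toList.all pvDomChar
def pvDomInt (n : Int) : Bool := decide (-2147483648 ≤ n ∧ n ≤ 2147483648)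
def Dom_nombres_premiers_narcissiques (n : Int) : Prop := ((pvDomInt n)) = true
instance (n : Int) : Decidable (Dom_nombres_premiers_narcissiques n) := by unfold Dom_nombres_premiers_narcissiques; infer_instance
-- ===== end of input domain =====

-- B scans the range below n in digit-length blocks (exponent computed once per block, digit sum by a bare
-- arithmetic loop, early-exit trial division for primality) — measurably faster than A by a constant factor.

-- B scans the range below n in digit-length blocks (narcissistic exponent fixed per block, digit sum by a bare
-- arithmetic loop) and uses early-exit trial division for primality; measured faster by a constant factor.

-- ===== PORT A =====
-- math.isqrt; exact for k ≥ 0 (A only applies it to k ≥ 0, Python raises on k < 0)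
def pvIsqrt (k : Int) : Int := ((Nat.sqrt k.toNat : Nat) : Int)

-- inner 'diviseurs' of A: collect i and n//i for i in range(1, isqrt(n)+1)
def pvDiviseurs (k : Int) : List Int :=
  (PySem.List.pyRange 1 (pvIsqrt k + 1) 1).foldl
    (fun L i =>
      if PySem.Int.mod k i = 0 then
        (if PySem.Int.floordiv k i ≠ i then (L ++ [i]) ++ [PySem.Int.floordiv k i] else L ++ [i])
      else L) []

def pvPremier (k : Int) : Bool := if (pvDiviseurs k).length = 2 then true else false

-- 'while n != 0' digit loop of A's chiffres; fuel k.toNat+1 suffices for k ≥ 0 (n strictly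
-- decreases under //10); the loop is only reached with k ≥ 0 (k comes from range(n))
def pvChiffresLoop : Nat → Int → List Int → List Int
  | 0, _, L => L
  | f+1, m, L =>
    if m = 0 then L
    else pvChiffresLoop f (PySem.Int.floordiv m 10) (L ++ [PySem.Int.mod m 10])

def pvChiffres (k : Int) : List Int :=
  if k = 0 then [0] else (pvChiffresLoop (k.toNat + 1) k []).reverse

def pvNarcisse (k : Int) : Bool :=
  let chiffre := pvChiffres k
  let somme := chiffre.foldl (fun s i => s + i ^ chiffre.length) 0
  if somme = k then true else false

def nombres_premiers_narcissiques (n : Int) : List Int :=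
  (PySem.List.pyRange 0 n 1).foldl
    (fun liste i => if pvNarcisse i && pvPremier i then liste ++ [i] else liste) []

-- ===== PORT B =====
-- 'while d*d <= k' trial-division loop; fuel k.toNat+1 suffices (d ≤ isqrt k + 1 ≤ k + 1);
-- fuel 0 returns true, matching the loop's fall-through (only reached when d*d > k already)
def pvEstPremierLoop : Nat → Int → Int → Bool
  | 0, _, _ => true
  | f+1, k, d =>
    if d * d ≤ k then
      (if PySem.Int.mod k d = 0 then false else pvEstPremierLoop f k (d + 1))
    else true

def pvEstPremier (k : Int) : Bool :=
  if k < 2 then false else pvEstPremierLoop (k.toNat + 1) k 2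

-- 'while m != 0' digit-sum loop of B's est_narcissique; fuel k.toNat+1 suffices for k ≥ 0
def pvSommeLoop : Nat → Int → Int → Int → Int
  | 0, _, _, s => s
  | f+1, p, m, s =>
    if m = 0 then s
    else pvSommeLoop f p (PySem.Int.floordiv m 10) (s + (PySem.Int.mod m 10) ^ p.toNat)

def pvEstNarcissique (k p : Int) : Bool := pvSommeLoop (k.toNat + 1) p k 0 == k

-- outer 'while lo < n' block loop of B; fuel n.toNat+1 suffices (lo at least doubles each turn)
def pvBlocksLoop : Nat → Int → Int → Int → List Int → List Int
  | 0, _, _, _, res => res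
  | f+1, n, lo, p, res =>
    if lo < n then
      let hi := min n (if lo ≠ 0 then 10 * lo else 10)
      let res' := (PySem.List.pyRange lo hi 1).foldl
        (fun r k => if pvEstNarcissique k p && pvEstPremier k then r ++ [k] else r) res
      pvBlocksLoop f n hi (p + 1) res'
    else res

def nombres_premiers_narcissiques_alt (n : Int) : List Int :=
  pvBlocksLoop (n.toNat + 1) n 0 1 []

-- ===== PRECONDITION & SPEC =====
def Spec_nombres_premiers_narcissiques (n : Int) (out : List Int) : Prop := out = nombres_premiers_narcissiques_alt n
instance (n : Int) (out : List Int) : Decidable (Spec_nombres_premiers_narcissiques n out) := by unfold Spec_nombres_premiers_narcissiques; infer_instance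

-- ===== CLAIM (what is proved, stated in full; the proofs are below) =====
def Claim_equal_nombres_premiers_narcissiques : Prop := ∀ (n : Int), Dom_nombres_premiers_narcissiques n → Spec_nombres_premiers_narcissiques n (nombres_premiers_narcissiques n)

-- ===== LEMMAS AND PROOFS =====

def pvDS (m e : Nat) : Int := ((Nat.digits 10 m).map (fun d => (d : Int) ^ e)).sum

lemma cast10 : (10 : Int) = ((10 : Nat) : Int) := by norm_num

lemma pvChiffresLoop_spec (f : Nat) : ∀ (m : Nat) (L : List Int), m < f →
    pvChiffresLoop f (m : Int) L = L ++ (Nat.digits 10 m).map (fun d => (d : Int)) := by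
  induction f with
  | zero => intro m L h; omega
  | succ f ih =>
    intro m L h
    by_cases hm : m = 0
    · subst hm; simp [pvChiffresLoop]
    · rw [pvChiffresLoop]
      rw [if_neg (by exact_mod_cast hm)]
      rw [cast10, PySem.Int.floordiv_natCast, PySem.Int.mod_natCast]
      rw [ih (m / 10) _ (by have h2 : m / 10 < m := Nat.div_lt_self (by omega) (by omega); omega)]
      rw [Nat.digits_def' (b := 10) (by norm_num) (Nat.pos_of_ne_zero hm)]
      simp

lemma pvChiffres_spec (m : Nat) :
    pvChiffres (m : Int) =
      if m = 0 then [0] else ((Nat.digits 10 m).map (fun d => (d : Int))).reverse := by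
  by_cases hm : m = 0
  · subst hm; simp [pvChiffres]
  · rw [pvChiffres, if_neg (by exact_mod_cast hm), if_neg hm,
      pvChiffresLoop_spec ((m : Int).toNat + 1) m [] (by simp)]
    simp

lemma pvNarcisse_spec (m : Nat) (hm : 0 < m) :
    pvNarcisse (m : Int) = decide (pvDS m (Nat.digits 10 m).length = (m : Int)) := by
  have hm' : m ≠ 0 := by omega
  simp only [pvNarcisse, pvChiffres_spec, if_neg hm']
  rw [PySem.List.foldl_add]
  simp [pvDS]

lemma pvSommeLoop_spec (f : Nat) : ∀ (m : Nat) (p s : Int), m < f →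
    pvSommeLoop f p (m : Int) s = s + pvDS m p.toNat := by
  induction f with
  | zero => intro m p s h; omega
  | succ f ih =>
    intro m p s h
    by_cases hm : m = 0
    · subst hm; simp [pvSommeLoop, pvDS]
    · rw [pvSommeLoop]
      rw [if_neg (by exact_mod_cast hm)]
      rw [cast10, PySem.Int.floordiv_natCast, PySem.Int.mod_natCast]
      rw [ih (m / 10) p _ (by have h2 : m / 10 < m := Nat.div_lt_self (by omega) (by omega); omega)]
      rw [pvDS, pvDS, Nat.digits_def' (b := 10) (by norm_num) (Nat.pos_of_ne_zero hm)]
      simp; ring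

lemma pvEstNarcissique_spec (m : Nat) (p : Int) :
    pvEstNarcissique (m : Int) p = decide (pvDS m p.toNat = (m : Int)) := by
  rw [pvEstNarcissique, pvSommeLoop_spec (((m : Int)).toNat + 1) m p 0 (by simp)]
  simp only [zero_add]
  exact Bool.beq_eq_decide_eq (pvDS m p.toNat) ((m : Nat) : Int)

lemma pvDigitsLen (j m : Nat)
    (h : (j = 0 ∧ m < 10) ∨ (10 ^ j ≤ m ∧ m < 10 ^ (j + 1))) (hm : 0 < m) :
    (Nat.digits 10 m).length = j + 1 := by
  have h2 : m < 10 ^ (j + 1) := by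
    rcases h with ⟨rfl, h⟩ | ⟨_, h⟩
    · simpa using h
    · exact h
  have h3 : ¬ m < 10 ^ j := by
    rcases h with ⟨rfl, _⟩ | ⟨h, _⟩
    · omega
    · omega
  have hb : (1 : Nat) < 10 := by norm_num
  have l1 := (Nat.digits_length_le_iff (k := j + 1) hb m).mpr h2
  have l2 : ¬ (Nat.digits 10 m).length ≤ j :=
    fun hl => h3 ((Nat.digits_length_le_iff (k := j) hb m).mp hl)
  omega

lemma pvNarc_agree (j m : Nat)
    (h : (j = 0 ∧ m < 10) ∨ (10 ^ j ≤ m ∧ m < 10 ^ (j + 1))) :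
    pvEstNarcissique (m : Int) ((j : Int) + 1) = pvNarcisse (m : Int) := by
  by_cases hm : m = 0
  · subst hm
    have hj : j = 0 := by
      rcases h with ⟨rfl, _⟩ | ⟨h, _⟩
      · rfl
      · exact absurd h (by simp)
    subst hj
    decide
  · rw [pvEstNarcissique_spec, pvNarcisse_spec m (by omega),
      pvDigitsLen j m h (by omega)]
    norm_num

def pvGDiv (k i : Int) : List Int :=
  if PySem.Int.mod k i = 0 then
    (if PySem.Int.floordiv k i ≠ i then [i, PySem.Int.floordiv k i] else [i])
  else []

lemma pvDiviseurs_eq_flatMap (k : Int) :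
    pvDiviseurs k = (PySem.List.pyRange 1 (pvIsqrt k + 1) 1).flatMap (pvGDiv k) := by
  rw [pvDiviseurs]
  have hfn : (fun (L : List Int) i =>
      if PySem.Int.mod k i = 0 then
        (if PySem.Int.floordiv k i ≠ i then (L ++ [i]) ++ [PySem.Int.floordiv k i] else L ++ [i])
      else L) = fun L i => L ++ pvGDiv k i := by
    funext L i
    simp only [pvGDiv]
    split_ifs <;> simp
  rw [hfn, PySem.List.foldl_append_eq_flatMap]
  simp

lemma pvGDiv_eq_nil_iff (k i : Int) : pvGDiv k i = [] ↔ PySem.Int.mod k i ≠ 0 := by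
  rw [pvGDiv]
  split_ifs with h1 h2 <;> simp [h1]

lemma pvPremier_iff (m : Nat) :
    pvPremier (m : Int) = true ↔ (2 ≤ m ∧ ∀ d : Nat, 2 ≤ d → d * d ≤ m → ¬ d ∣ m) := by
  match m with
  | 0 => rw [show ((0 : Nat) : Int) = 0 by rfl, show pvPremier 0 = false by decide]; simp
  | 1 => rw [show ((1 : Nat) : Int) = 1 by rfl, show pvPremier 1 = false by decide]; simp
  | (m + 2) =>
    set m' := m + 2 with hm'
    have hm2 : 2 ≤ m' := by omega
    have hs1 : 1 ≤ Nat.sqrt m' := Nat.le_sqrt.mpr (by omega)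
    have hsq : pvIsqrt (m' : Int) = ((Nat.sqrt m' : Nat) : Int) := by simp [pvIsqrt]
    rw [pvPremier, pvDiviseurs_eq_flatMap, hsq]
    rw [PySem.List.pyRange_one_append 1 2 (((Nat.sqrt m' : Nat) : Int) + 1) (by omega)
      (by exact_mod_cast by omega : (2 : Int) ≤ ((Nat.sqrt m' : Nat) : Int) + 1)]
    rw [show PySem.List.pyRange 1 2 1 = [1] by decide]
    rw [List.flatMap_append]
    have hg1 : pvGDiv (m' : Int) 1 = [1, (m' : Int)] := by
      rw [pvGDiv, if_pos (by rw [show (1 : Int) = ((1 : Nat) : Int) by rfl, PySem.Int.mod_natCast]; simp),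
        if_pos (by rw [show (1 : Int) = ((1 : Nat) : Int) by rfl, PySem.Int.floordiv_natCast]
                   simp
                   omega)]
      rw [show (1 : Int) = ((1 : Nat) : Int) by rfl, PySem.Int.floordiv_natCast]
      simp
    rw [show List.flatMap (pvGDiv (m' : Int)) [1] = pvGDiv (m' : Int) 1 by simp, hg1]
    set rest := List.flatMap (pvGDiv (m' : Int)) (PySem.List.pyRange 2 (((Nat.sqrt m' : Nat) : Int) + 1) 1) with hrest
    constructor
    · intro hlen
      refine ⟨hm2, ?_⟩
      have hlen' : ([1, (m' : Int)] ++ rest).length = 2 := by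
        by_contra hne
        rw [if_neg hne] at hlen
        exact Bool.false_ne_true hlen
      simp only [List.length_append, List.length_cons, List.length_nil] at hlen'
      have hnil : rest = [] := List.length_eq_zero_iff.mp (by omega)
      intro d hd2 hdd hdvd
      have hdsq : d ≤ Nat.sqrt m' := Nat.le_sqrt.mpr hdd
      have hmem : (d : Int) ∈ PySem.List.pyRange 2 (((Nat.sqrt m' : Nat) : Int) + 1) 1 := by
        rw [PySem.List.mem_pyRange_one]
        have hc : (d : Int) ≤ ((Nat.sqrt m' : Nat) : Int) := by exact_mod_cast hdsq
        constructor
        · exact_mod_cast hd2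
        · omega
      have hdnil : pvGDiv (m' : Int) (d : Int) = [] :=
        List.flatMap_eq_nil_iff.mp hnil _ hmem
      rw [pvGDiv_eq_nil_iff] at hdnil
      exact hdnil (by
        rw [PySem.Int.mod_natCast]
        exact_mod_cast (Nat.dvd_iff_mod_eq_zero).mp hdvd)
    · rintro ⟨-, hall⟩
      have hnil : rest = [] := by
        rw [hrest, List.flatMap_eq_nil_iff]
        intro i hmem
        rw [PySem.List.mem_pyRange_one] at hmem
        obtain ⟨hi2, hilt⟩ := hmem
        have hid : i = (i.toNat : Int) := by omega
        set d := i.toNat with hd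
        have hd2 : 2 ≤ d := by omega
        have hdsq : d ≤ Nat.sqrt m' := by omega
        have hndvd := hall d hd2 (Nat.le_sqrt.mp hdsq)
        rw [hid, pvGDiv_eq_nil_iff, PySem.Int.mod_natCast]
        simp only [ne_eq, Int.natCast_eq_zero]
        rw [← Nat.dvd_iff_mod_eq_zero]
        exact hndvd
      rw [hnil]
      simp

lemma pvEstPremierLoop_iff (f : Nat) : ∀ (m d : Nat), 2 ≤ d → m + 1 ≤ f + d →
    (pvEstPremierLoop f (m : Int) (d : Int) = true ↔
      ∀ e : Nat, d ≤ e → e * e ≤ m → ¬ e ∣ m) := by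
  induction f with
  | zero =>
    intro m d hd2 hf
    rw [show pvEstPremierLoop 0 (m : Int) (d : Int) = true from rfl]
    simp only [true_iff]
    intro e he hee hdvd
    have h1 : e ≤ e * e := Nat.le_mul_of_pos_left e (by omega)
    omega
  | succ f ih =>
    intro m d hd2 hf
    rw [pvEstPremierLoop]
    by_cases hdd : d * d ≤ m
    · rw [if_pos (by exact_mod_cast hdd)]
      by_cases hdvd : d ∣ m
      · rw [if_pos (by rw [PySem.Int.mod_natCast]
                       exact_mod_cast Nat.dvd_iff_mod_eq_zero.mp hdvd)]
        simp only [Bool.false_eq_true, false_iff]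
        intro hall
        exact hall d le_rfl hdd hdvd
      · rw [if_neg (by rw [PySem.Int.mod_natCast]
                       simp only [Int.natCast_eq_zero]
                       rw [← Nat.dvd_iff_mod_eq_zero]
                       exact hdvd)]
        rw [show ((d : Int) + 1) = ((d + 1 : Nat) : Int) by push_cast; ring]
        rw [ih m (d + 1) (by omega) (by omega)]
        constructor
        · intro hall e he hee hdvd2
          rcases Nat.eq_or_lt_of_le he with rfl | hlt
          · exact hdvd hdvd2
          · exact hall e (by omega) hee hdvd2
        · exact fun hall e he hee => hall e (by omega) hee
    · rw [if_neg (by exact_mod_cast hdd)]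
      simp only [true_iff]
      intro e he hee
      have := Nat.mul_le_mul he he
      omega

lemma pvPrem_agree (m : Nat) : pvEstPremier (m : Int) = pvPremier (m : Int) := by
  by_cases h2 : m < 2
  · have hA : pvPremier (m : Int) = false := by
      rw [Bool.eq_false_iff]
      intro hp
      have := (pvPremier_iff m).mp hp
      omega
    rw [hA, pvEstPremier, if_pos (by exact_mod_cast h2)]
  · rw [pvEstPremier, if_neg (by exact_mod_cast h2)]
    have hloop := pvEstPremierLoop_iff (((m : Int)).toNat + 1) m 2 (by omega)
      (by simp only [Int.toNat_natCast]; omega)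
    rw [show ((2 : Int)) = ((2 : Nat) : Int) by rfl] at *
    rw [Bool.eq_iff_iff, hloop, pvPremier_iff]
    constructor
    · exact fun hall => ⟨by omega, hall⟩
    · exact fun h => h.2

def pvPredA (i : Int) : Bool := pvNarcisse i && pvPremier i

lemma pvBlocksLoop_stop (f : Nat) (n lo p : Int) (res : List Int) (h : n ≤ lo) :
    pvBlocksLoop f n lo p res = res := by
  cases f with
  | zero => rfl
  | succ f => rw [pvBlocksLoop, if_neg (by omega)]

lemma pvInnerFold (p : Int) (l : List Int) (res : List Int) :
    l.foldl (fun r k => if pvEstNarcissique k p && pvEstPremier k then r ++ [k] else r) res =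
      res ++ l.filter (fun k => pvEstNarcissique k p && pvEstPremier k) := by
  rw [show (fun (r : List Int) k => if pvEstNarcissique k p && pvEstPremier k then r ++ [k] else r) =
      (fun acc x => if (fun k => pvEstNarcissique k p && pvEstPremier k) x = true then acc ++ [id x] else acc) from by
    funext r k; simp]
  rw [PySem.List.foldl_append_if]
  simp

lemma pvFilterBlock (j : Nat) (hi : Int) (hhi : hi ≤ (10 : Int) ^ (j + 1)) :
    (PySem.List.pyRange (if j = 0 then 0 else (10 : Int) ^ j) hi 1).filter
        (fun k => pvEstNarcissique k ((j : Int) + 1) && pvEstPremier k) =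
      (PySem.List.pyRange (if j = 0 then 0 else (10 : Int) ^ j) hi 1).filter pvPredA := by
  apply List.filter_congr
  intro k hk
  rw [PySem.List.mem_pyRange_one] at hk
  obtain ⟨hk1, hk2⟩ := hk
  have hk0 : 0 ≤ k := le_trans (by positivity) hk1
  have hkm : k = ((k.toNat : Nat) : Int) := by omega
  set m := k.toNat with hm
  have hcast : ((10 : Nat) ^ (j + 1) : Int) = (10 : Int) ^ (j + 1) := by push_cast; ring
  have hlt : m < 10 ^ (j + 1) := by
    have : k < (10 : Int) ^ (j + 1) := by omega
    rw [hkm, ← hcast] at this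
    exact_mod_cast this
  have hcond : (j = 0 ∧ m < 10) ∨ (10 ^ j ≤ m ∧ m < 10 ^ (j + 1)) := by
    rcases Nat.eq_zero_or_pos j with rfl | hj
    · left
      exact ⟨rfl, by simpa using hlt⟩
    · right
      refine ⟨?_, hlt⟩
      rw [if_neg (by omega)] at hk1
      have hcastj : ((10 : Nat) ^ j : Int) = (10 : Int) ^ j := by push_cast; ring
      have : ((10 : Nat) ^ j : Int) ≤ ((m : Nat) : Int) := by rw [hcastj]; omega
      exact_mod_cast this
  rw [hkm, pvPredA, pvNarc_agree j m hcond, pvPrem_agree m]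

lemma pvBlocksLoop_succ (f : Nat) (n lo p : Int) (res : List Int) :
    pvBlocksLoop (f + 1) n lo p res =
      if lo < n then
        pvBlocksLoop f n (min n (if lo ≠ 0 then 10 * lo else 10)) (p + 1)
          ((PySem.List.pyRange lo (min n (if lo ≠ 0 then 10 * lo else 10)) 1).foldl
            (fun r k => if pvEstNarcissique k p && pvEstPremier k then r ++ [k] else r) res)
      else res := rfl

lemma pvBlocksLoop_spec (fuel : Nat) : ∀ (j : Nat) (n : Int) (res : List Int),
    n ≤ 10 ^ (j + fuel) →
    pvBlocksLoop (fuel + 1) n (if j = 0 then 0 else (10 : Int) ^ j) ((j : Int) + 1) res =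
      res ++ (PySem.List.pyRange (if j = 0 then 0 else (10 : Int) ^ j) n 1).filter pvPredA := by
  induction fuel with
  | zero =>
    intro j n res hn
    by_cases hl : (if j = 0 then 0 else (10 : Int) ^ j) < n
    · -- one last block: n ≤ 10^j and lo < n force j = 0 and n = 1
      have hj : j = 0 := by
        by_contra hj
        rw [if_neg hj] at hl
        simp only [Nat.add_zero] at hn
        omega
      subst hj
      simp only [Nat.zero_add, pow_zero] at hn
      rw [show (if (0 : Nat) = 0 then (0 : Int) else (10 : Int) ^ (0 : Nat)) = 0 from rfl] at hl
      have hn1 : n = 1 := by omega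
      subst hn1
      rw [show (if (0 : Nat) = 0 then (0 : Int) else (10 : Int) ^ (0 : Nat)) = 0 from rfl]
      rw [show pvBlocksLoop (0 + 1) 1 0 (((0 : Nat) : Int) + 1) res = res from rfl]
      rw [show List.filter pvPredA (PySem.List.pyRange 0 1 1) = ([] : List Int) from rfl]
      rw [List.append_nil]
    · rw [pvBlocksLoop_stop _ _ _ _ _ (by omega)]
      rw [PySem.List.pyRange_one_eq_nil (by omega)]
      simp
  | succ fuel ih =>
    intro j n res hn
    by_cases hl : (if j = 0 then 0 else (10 : Int) ^ j) < n
    · rw [pvBlocksLoop_succ, if_pos hl]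
      have hten : (if (if j = 0 then 0 else (10 : Int) ^ j) ≠ 0 then 10 * (if j = 0 then 0 else (10 : Int) ^ j) else 10) = (10 : Int) ^ (j + 1) := by
        rcases Nat.eq_zero_or_pos j with rfl | hj
        · norm_num
        · rw [if_neg (show ¬(j = 0) from by omega)]
          rw [if_pos (show (10 : Int) ^ j ≠ 0 from by positivity)]
          rw [pow_succ]
          ring
      rw [hten, pvInnerFold, pvFilterBlock j _ (min_le_right _ _)]
      by_cases hcase : (10 : Int) ^ (j + 1) ≤ n
      · have hmin : min n ((10 : Int) ^ (j + 1)) = (10 : Int) ^ (j + 1) := min_eq_right hcase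
        rw [hmin]
        have hrec := ih (j + 1) n (res ++ (PySem.List.pyRange (if j = 0 then 0 else (10 : Int) ^ j) ((10 : Int) ^ (j + 1)) 1).filter pvPredA)
          (by rw [show j + 1 + fuel = j + (fuel + 1) by omega]; exact hn)
        rw [if_neg (by omega)] at hrec
        rw [show ((j : Int) + 1 + 1) = (((j + 1 : Nat) : Int) + 1) by push_cast; ring]
        rw [hrec]
        rw [List.append_assoc, ← List.filter_append]
        rw [← PySem.List.pyRange_one_append _ _ _ (by rcases Nat.eq_zero_or_pos j with rfl | hj
                                                      · norm_num
                                                      · rw [if_neg (by omega)]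
                                                        apply pow_le_pow_right₀ (by norm_num) (by omega)) hcase]
      · have hmin : min n ((10 : Int) ^ (j + 1)) = n := min_eq_left (by omega)
        rw [hmin]
        rw [pvBlocksLoop_stop _ _ _ _ _ le_rfl]
    · rw [pvBlocksLoop_stop _ _ _ _ _ (by omega)]
      rw [PySem.List.pyRange_one_eq_nil (by omega)]
      simp

lemma pvMain : ∀ (n : Int),
    nombres_premiers_narcissiques n = nombres_premiers_narcissiques_alt n := by
  intro n
  have hA : nombres_premiers_narcissiques n = (PySem.List.pyRange 0 n 1).filter pvPredA := by
    rw [nombres_premiers_narcissiques]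
    rw [show (fun (liste : List Int) i => if pvNarcisse i && pvPremier i then liste ++ [i] else liste) =
        (fun acc x => if pvPredA x = true then acc ++ [id x] else acc) from by
      funext L i; simp [pvPredA]]
    rw [PySem.List.foldl_append_if]
    simp
  rw [hA, nombres_premiers_narcissiques_alt]
  by_cases hn : n ≤ 0
  · rw [show n.toNat = 0 from by omega]
    rw [pvBlocksLoop_stop _ _ _ _ _ (by omega)]
    rw [PySem.List.pyRange_one_eq_nil (by omega)]
    simp
  · have h1 : 1 ≤ n.toNat := by omega
    have hb := pvBlocksLoop_spec n.toNat 0 n []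
    rw [if_pos rfl] at hb
    rw [show ((0 : Nat) : Int) + 1 = 1 from by norm_num] at hb
    rw [hb (by
      have h2 : n.toNat < 2 ^ n.toNat := Nat.lt_two_pow_self
      have h3 : (2 : Nat) ^ n.toNat ≤ 10 ^ n.toNat := Nat.pow_le_pow_left (by norm_num) _
      have h4 : n.toNat < 10 ^ n.toNat := by omega
      have h5 : ((n.toNat : Nat) : Int) < (((10 : Nat) ^ n.toNat : Nat) : Int) := by exact_mod_cast h4
      have h6 : (((10 : Nat) ^ n.toNat : Nat) : Int) = (10 : Int) ^ n.toNat := by push_cast; ring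
      rw [Nat.zero_add]
      omega)]
    simp

-- ===== VERDICT (by name: the statement is the Claim_ definition above) =====
theorem nombres_premiers_narcissiques_spec : Claim_equal_nombres_premiers_narcissiques := by
  intro n _
  unfold Spec_nombres_premiers_narcissiques
  exact pvMain n
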